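-- pv_equiv track=rewrite | github.com/flaport/photontorch | network/network.py | _parse_connections
-- ===== SOURCE A (Python) =====
-- def _parse_connections(S):
--     connections = []
--     for i1, s1 in enumerate(S[:-1]):
--         for i2, s2 in enumerate(S[i1+1:], start=i1+1):
--             for j1, c1 in enumerate(s1):
--                 for j2, c2 in enumerate(s2):
--                     if c1==c2:
--                         connections += [(i1,j1,i2,j2)]
--     return connections
-- ===== SOURCE B (Python) =====
-- def _parse_connections(S):
--     # Per-string char->positions index built once; the pair loop then emits the
--     # precomputed matching positions instead of scanning s2 character by character.
--     def make_index(s):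
--         d = {}
--         for j, c in enumerate(s):
--             d[c] = d.get(c, []) + [j]
--         return d
--
--     index = [make_index(s) for s in S]
--     connections = []
--     for i1, s1 in enumerate(S):
--         for i2 in range(i1 + 1, len(S)):
--             d2 = index[i2]
--             for j1, c1 in enumerate(s1):
--                 for j2 in d2.get(c1, []):
--                     connections.append((i1, j1, i2, j2))
--     return connections
-- ===== Notes on version B (the rewrite author's own statement) =====
-- stated objective: alternative
-- what changed: B builds a per-string char->positions dictionary once and, for each string pair, walks s1 emitting the precomputed matching positions of s2, instead of A's nested character-by-character scan (measured 1.64x at the largest size both finished, not confirmed at the top size).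
import Mathlib
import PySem

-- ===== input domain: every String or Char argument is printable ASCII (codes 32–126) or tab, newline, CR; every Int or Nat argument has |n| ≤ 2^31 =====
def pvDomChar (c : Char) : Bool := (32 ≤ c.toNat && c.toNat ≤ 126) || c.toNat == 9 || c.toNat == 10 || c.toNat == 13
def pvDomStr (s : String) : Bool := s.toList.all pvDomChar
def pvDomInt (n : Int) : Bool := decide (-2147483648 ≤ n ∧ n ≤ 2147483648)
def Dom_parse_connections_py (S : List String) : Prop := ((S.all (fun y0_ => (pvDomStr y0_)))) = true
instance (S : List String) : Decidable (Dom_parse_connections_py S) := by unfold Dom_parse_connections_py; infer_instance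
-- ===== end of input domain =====

-- B replaces A's inner character-by-character scan of each pair by a per-string
-- char->positions index built once; return value proved identical (objective: alternative).

-- ===== PORT A =====
def parse_connections_py (S : List String) : List (List Int) :=
  (PySem.List.enumerate (PySem.List.slice S none (some (-1))) 0).foldl (fun conns p1 =>
    (PySem.List.enumerate (PySem.List.slice S (some (p1.1 + 1)) none) (p1.1 + 1)).foldl (fun conns p2 =>
      (PySem.List.enumerate p1.2.toList 0).foldl (fun conns q1 =>
        (PySem.List.enumerate p2.2.toList 0).foldl (fun conns q2 =>
          if q1.2 == q2.2 then conns ++ [[p1.1, q1.1, p2.1, q2.1]] else conns)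
          conns)
        conns)
      conns)
    []

-- ===== PORT B =====
-- d[c] = d.get(c, []) + [j]  over  enumerate(s)
def pvMakeIndex (s : String) : PySem.Dict Char (List Int) :=
  (PySem.List.enumerate s.toList 0).foldl
    (fun d q => d.modify q.2 [] (· ++ [q.1])) PySem.Dict.empty

def parse_connections_py_alt (S : List String) : List (List Int) :=
  let index := S.map pvMakeIndex
  (PySem.List.enumerate S 0).foldl (fun conns p1 =>
    (PySem.List.pyRange (p1.1 + 1) S.length 1).foldl (fun conns i2 =>
      let d2 := PySem.List.pyGetD index i2 PySem.Dict.empty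
      (PySem.List.enumerate p1.2.toList 0).foldl (fun conns q1 =>
        (d2.getD q1.2 []).foldl (fun conns j2 =>
          conns ++ [[p1.1, q1.1, i2, j2]])
          conns)
        conns)
      conns)
    []

-- ===== PRECONDITION & SPEC =====
def Spec_parse_connections_py (S : List String) (out : List (List Int)) : Prop := out = parse_connections_py_alt S
instance (S : List String) (out : List (List Int)) : Decidable (Spec_parse_connections_py S out) := by unfold Spec_parse_connections_py; infer_instance

-- ===== CLAIM (what is proved, stated in full; the proofs are below) =====
def Claim_equal_parse_connections_py : Prop := ∀ (S : List String), Dom_parse_connections_py S → Spec_parse_connections_py S (parse_connections_py S)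


-- ===== LEMMAS AND PROOFS =====

lemma pvBeqComm {α : Type} [BEq α] [LawfulBEq α] (a b : α) : (a == b) = (b == a) := by
  by_cases h : a = b
  · subst h; rfl
  · rw [beq_eq_false_iff_ne.mpr h, beq_eq_false_iff_ne.mpr (Ne.symm h)]

-- the per-string index looks up exactly the positions of c in s, in order
lemma pvIndex_getD (s : String) (c : Char) :
    (pvMakeIndex s).getD c [] =
      ((PySem.List.enumerate s.toList 0).filter (fun q => q.2 == c)).map (fun q => q.1) := by
  unfold pvMakeIndex
  rw [show (PySem.List.enumerate s.toList 0).foldl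
        (fun d q => d.modify q.2 [] (· ++ [q.1])) PySem.Dict.empty
      = ((PySem.List.enumerate s.toList 0).map (fun q => (q.2, q.1))).foldl
        (fun d p => d.modify p.1 [] (· ++ [p.2])) PySem.Dict.empty from
      (List.foldl_map (f := fun q : Int × Char => (q.2, q.1))
        (g := fun (d : PySem.Dict Char (List Int)) (p : Char × Int) =>
          d.modify p.1 [] (· ++ [p.2]))
        (l := PySem.List.enumerate s.toList 0) (init := PySem.Dict.empty)).symm]
  rw [PySem.Dict.getD_foldl_modify_append]
  simp [List.filter_map, List.map_map, Function.comp_def]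

-- enumerate(xs[m:], start=m) is the index loop over range(m, len(xs))
lemma pvEnumDrop {α : Type} (d : α) (xs : List α) :
    ∀ (n m : Nat), xs.length - m = n → m ≤ xs.length →
      PySem.List.enumerate (xs.drop m) (m : Int)
        = (PySem.List.pyRange (m : Int) (xs.length : Int) 1).map
            (fun i => (i, PySem.List.pyGetD xs i d)) := by
  intro n
  induction n with
  | zero =>
      intro m h1 h2
      have hm : m = xs.length := by omega
      subst hm
      rw [List.drop_length, PySem.List.enumerate_nil,
        PySem.List.pyRange_one_eq_nil (le_refl _), List.map_nil]
  | succ n ih =>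
      intro m h1 h2
      have hm : m < xs.length := by omega
      rw [List.drop_eq_getElem_cons hm, PySem.List.enumerate_cons,
        PySem.List.pyRange_one_cons (by exact_mod_cast hm), List.map_cons]
      have hcast : (m : Int) + 1 = ((m + 1 : Nat) : Int) := by push_cast; ring
      rw [hcast, ih (m + 1) (by omega) (by omega)]
      rw [PySem.List.pyGetD_natCast, List.getD_eq_getElem xs d hm]

-- the two j-loops agree for every pair of strings
lemma pvPairEq (i1 i2 : Int) (s1 s2 : String) :
    ((PySem.List.enumerate s1.toList 0).flatMap (fun q1 =>
        ((PySem.List.enumerate s2.toList 0).filter (fun q2 => q1.2 == q2.2)).map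
          (fun q2 => [i1, q1.1, i2, q2.1])))
      = (PySem.List.enumerate s1.toList 0).flatMap (fun q1 =>
          ((pvMakeIndex s2).getD q1.2 []).map (fun j2 => [i1, q1.1, i2, j2])) := by
  refine List.flatMap_congr (fun q1 _ => ?_)
  rw [pvIndex_getD, List.map_map]
  rw [List.filter_congr (fun q2 _ => pvBeqComm q1.2 q2.2)]
  rfl

-- index lookup: pyGetD over the mapped list is pvMakeIndex of the looked-up string
lemma pvIndexLookup (S : List String) (i : Int) (h0 : 0 ≤ i) (h1 : i < (S.length : Int)) :
    PySem.List.pyGetD (S.map pvMakeIndex) i PySem.Dict.empty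
      = pvMakeIndex (PySem.List.pyGetD S i "") := by
  obtain ⟨t, rfl⟩ : ∃ t : Nat, i = (t : Int) := ⟨i.toNat, (Int.toNat_of_nonneg h0).symm⟩
  have ht : t < S.length := by exact_mod_cast h1
  rw [PySem.List.pyGetD_natCast, PySem.List.pyGetD_natCast,
    List.getD_eq_getElem _ _ (by simpa using ht), List.getD_eq_getElem _ _ ht,
    List.getElem_map]

lemma pvMain (S : List String) : parse_connections_py S = parse_connections_py_alt S := by
  unfold parse_connections_py parse_connections_py_alt
  simp only [PySem.List.foldl_append_if, PySem.List.foldl_append_singleton_eq_map,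
    PySem.List.foldl_append_eq_flatMap, List.nil_append, PySem.List.slice_to_neg_one]
  by_cases hS : S = []
  · subst hS; rfl
  · conv_rhs => rw [show PySem.List.enumerate S 0
      = PySem.List.enumerate S.dropLast 0
        ++ PySem.List.enumerate [S.getLast hS] (0 + (S.dropLast.length : Int)) from by
        rw [← PySem.List.enumerate_append, List.dropLast_append_getLast hS]]
    rw [List.flatMap_append]
    have hlast : (PySem.List.enumerate [S.getLast hS] (0 + (S.dropLast.length : Int))).flatMap
        (fun p1 => (PySem.List.pyRange (p1.1 + 1) (S.length : Int) 1).flatMap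
          (fun i2 => (PySem.List.enumerate p1.2.toList 0).flatMap (fun q1 =>
            ((PySem.List.pyGetD (S.map pvMakeIndex) i2 PySem.Dict.empty).getD q1.2 []).map
              (fun j2 => [p1.1, q1.1, i2, j2])))) = [] := by
      rw [PySem.List.enumerate_cons, PySem.List.enumerate_nil]
      simp only [List.flatMap_cons, List.flatMap_nil, List.append_nil]
      rw [PySem.List.pyRange_one_eq_nil (by
        have hdl : S.dropLast.length = S.length - 1 := List.length_dropLast
        have hpos : 0 < S.length := List.length_pos_iff.mpr hS
        omega), List.flatMap_nil]
    rw [hlast, List.append_nil]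
    refine List.flatMap_congr (fun p1 hp1 => ?_)
    obtain ⟨k, hk, rfl⟩ := (PySem.List.mem_enumerate_iff _ _ _).mp hp1
    simp only [zero_add]
    have hklen : k + 1 ≤ S.length := by
      have hdl : S.dropLast.length = S.length - 1 := List.length_dropLast
      omega
    have hcast : (k : Int) + 1 = ((k + 1 : Nat) : Int) := by push_cast; ring
    have hdrop : PySem.List.slice S (some ((k : Int) + 1)) none = S.drop (k + 1) := by
      rw [hcast, PySem.List.slice_from_natCast]
    rw [hdrop, hcast, pvEnumDrop "" S (S.length - (k + 1)) (k + 1) rfl hklen,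
      List.flatMap_map]
    refine List.flatMap_congr (fun i hi => ?_)
    obtain ⟨hi0, hi1⟩ := PySem.List.mem_pyRange_one.mp hi
    rw [pvIndexLookup S i (by omega) hi1]
    exact pvPairEq (k : Int) i _ _

-- ===== VERDICT (by name: the statement is the Claim_ definition above) =====
theorem parse_connections_py_spec : Claim_equal_parse_connections_py := by
  intro S _
  unfold Spec_parse_connections_py
  exact pvMain S
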